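-- pv_equiv track=rewrite | github.com/OxyMagnesium/tictactoe-evolved | t3e_ai.py | get_max_locs
-- ===== SOURCE A (Python) =====
-- def get_max_locs(score_grid):
--     locs = []
--     max = score_grid[1][1]
--     for i in range(3):
--         for j in range(3):
--             if score_grid[i][j] > max:
--                 max = score_grid[i][j]
--     for i in range(3):
--         for j in range(3):
--             if score_grid[i][j] == max:
--                 locs.append((i, j))
--     return locs
-- ===== SOURCE B (Python) =====
-- def get_max_locs(score_grid):
--     best = None
--     locs = []
--     for i in range(3):
--         for j in range(3):
--             v = score_grid[i][j]
--             if best is None or v > best: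
--                 best = v
--                 locs = [(i, j)]
--             elif v == best:
--                 locs.append((i, j))
--     return locs
-- ===== Notes on version B (the rewrite author's own statement) =====
-- stated objective: simpler
-- what changed: Replaces A's two full passes (find the max seeded from the centre cell, then collect matching cells) with a single row-major pass maintaining a running max and a location list that is reset on a new max and appended on a tie.
import Mathlib
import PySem

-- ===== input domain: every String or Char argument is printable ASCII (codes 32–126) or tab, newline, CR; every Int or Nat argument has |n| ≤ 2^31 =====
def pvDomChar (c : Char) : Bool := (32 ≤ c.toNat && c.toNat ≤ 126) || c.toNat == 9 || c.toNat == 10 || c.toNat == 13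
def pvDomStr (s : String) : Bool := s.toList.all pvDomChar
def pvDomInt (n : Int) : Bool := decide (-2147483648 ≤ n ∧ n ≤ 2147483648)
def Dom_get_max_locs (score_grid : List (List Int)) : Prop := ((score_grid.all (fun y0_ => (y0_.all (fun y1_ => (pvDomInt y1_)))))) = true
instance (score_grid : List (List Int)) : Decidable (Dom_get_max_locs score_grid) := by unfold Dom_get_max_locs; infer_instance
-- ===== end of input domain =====

-- B merges A's two passes (find the max, then collect matching cells) into one
-- row-major pass keeping a running max and a location list reset on a new max.

-- score_grid[i][j]; the default is only reached outside Pre_get_max_locs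
def pvCell (g : List (List Int)) (i j : Int) : Int :=
  (PySem.List.pyGet? ((PySem.List.pyGet? g i).getD []) j).getD 0

-- ===== PORT A =====
def get_max_locs (score_grid : List (List Int)) : List (Int × Int) :=
  let m0 := pvCell score_grid 1 1
  let m := (PySem.List.pyRange 0 3 1).foldl (fun m i =>
    (PySem.List.pyRange 0 3 1).foldl (fun m j =>
      if pvCell score_grid i j > m then pvCell score_grid i j else m) m) m0
  (PySem.List.pyRange 0 3 1).foldl (fun locs i =>
    (PySem.List.pyRange 0 3 1).foldl (fun locs j =>
      if pvCell score_grid i j == m then locs ++ [(i, j)] else locs) locs)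
    ([] : List (Int × Int))

-- ===== PORT B =====
def pvStepB (st : Option Int × List (Int × Int)) (i j v : Int) :
    Option Int × List (Int × Int) :=
  match st.1 with
  | none => (some v, [(i, j)])
  | some b =>
    if v > b then (some v, [(i, j)])
    else if v == b then (some b, st.2 ++ [(i, j)])
    else st

def get_max_locs_alt (score_grid : List (List Int)) : List (Int × Int) :=
  ((PySem.List.pyRange 0 3 1).foldl (fun st i =>
    (PySem.List.pyRange 0 3 1).foldl (fun st j =>
      pvStepB st i j (pvCell score_grid i j)) st)
    ((none : Option Int), ([] : List (Int × Int)))).2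

-- ===== PRECONDITION & SPEC =====
-- Pre_: exactly where Python A returns (an IndexError is raised otherwise):
-- at least 3 rows, and each of the first three rows has at least 3 entries.
def Pre_get_max_locs (score_grid : List (List Int)) : Prop :=
  3 ≤ score_grid.length ∧ 3 ≤ (score_grid.getD 0 []).length ∧
    3 ≤ (score_grid.getD 1 []).length ∧ 3 ≤ (score_grid.getD 2 []).length
instance (score_grid : List (List Int)) : Decidable (Pre_get_max_locs score_grid) := by
  unfold Pre_get_max_locs; infer_instance

def pvWitness_get_max_locs : List (List Int) :=
  [[1, 2, 3], [4, 5, 4], [3, 2, 5]]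

def Spec_get_max_locs (score_grid : List (List Int)) (out : List (Int × Int)) : Prop := out = get_max_locs_alt score_grid
instance (score_grid : List (List Int)) (out : List (Int × Int)) : Decidable (Spec_get_max_locs score_grid out) := by unfold Spec_get_max_locs; infer_instance

-- ===== CLAIM (what is proved, stated in full; the proofs are below) =====
def Claim_equal_get_max_locs : Prop := ∀ (score_grid : List (List Int)), Dom_get_max_locs score_grid → Pre_get_max_locs score_grid → Spec_get_max_locs score_grid (get_max_locs score_grid)

-- ===== LEMMAS AND PROOFS =====

-- a cell list in row-major order, with positions
def pvP (g : List (List Int)) : List ((Int × Int) × Int) :=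
  [((0,0), pvCell g 0 0), ((0,1), pvCell g 0 1), ((0,2), pvCell g 0 2),
   ((1,0), pvCell g 1 0), ((1,1), pvCell g 1 1), ((1,2), pvCell g 1 2),
   ((2,0), pvCell g 2 0), ((2,1), pvCell g 2 1), ((2,2), pvCell g 2 2)]

def pvRunMax (s : Int) (P : List ((Int × Int) × Int)) : Int :=
  P.foldl (fun m pv => if pv.2 > m then pv.2 else m) s

def pvCollect (M : Int) (P : List ((Int × Int) × Int)) : List (Int × Int) :=
  (P.filter (fun pv => pv.2 == M)).map Prod.fst

def pvStep (st : Option Int × List (Int × Int)) (pv : (Int × Int) × Int) :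
    Option Int × List (Int × Int) :=
  pvStepB st pv.1.1 pv.1.2 pv.2

lemma pvRunMax_eq_foldl_max (s : Int) (P : List ((Int × Int) × Int)) :
    pvRunMax s P = P.foldl (fun m pv => max m pv.2) s := by
  unfold pvRunMax; congr 1; funext m pv; omega

lemma le_pvRunMax (s : Int) (P : List ((Int × Int) × Int)) :
    s ≤ pvRunMax s P ∧ ∀ pv ∈ P, pv.2 ≤ pvRunMax s P := by
  rw [pvRunMax_eq_foldl_max]
  exact ⟨(PySem.List.le_foldl_max_int P Prod.snd s).1,
    fun pv h => (PySem.List.le_foldl_max_int P Prod.snd s).2 pv h⟩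

lemma pvInv (P : List ((Int × Int) × Int)) (b : Int) (locs : List (Int × Int)) :
    P.foldl pvStep (some b, locs)
      = (some (pvRunMax b P),
         (if b == pvRunMax b P then locs else []) ++ pvCollect (pvRunMax b P) P) := by
  induction P generalizing b locs with
  | nil => simp [pvRunMax, pvCollect]
  | cons pv P ih =>
    have hcons : ∀ M : Int, pvCollect M (pv :: P)
        = (if pv.2 == M then [pv.1] else []) ++ pvCollect M P := by
      intro M
      by_cases h : pv.2 = M <;> simp [pvCollect, h]
    by_cases hv : pv.2 > b
    · have hM : pvRunMax b (pv :: P) = pvRunMax pv.2 P := by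
        simp [pvRunMax, List.foldl_cons, if_pos hv]
      have hle : pv.2 ≤ pvRunMax pv.2 P := (le_pvRunMax pv.2 P).1
      have hbne : b ≠ pvRunMax pv.2 P := by omega
      have hstep : pvStep (some b, locs) pv = (some pv.2, [pv.1]) := by
        simp [pvStep, pvStepB, if_pos hv]
      rw [List.foldl_cons, hstep, ih, hM, hcons]
      simp [hbne]
    · have hM : pvRunMax b (pv :: P) = pvRunMax b P := by
        simp [pvRunMax, List.foldl_cons, if_neg hv]
      by_cases he : pv.2 = b
      · have hstep : pvStep (some b, locs) pv = (some b, locs ++ [pv.1]) := by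
          simp [pvStep, pvStepB, he]
        rw [List.foldl_cons, hstep, ih, hM, hcons]
        by_cases hb : b = pvRunMax b P
        · simp [he, ← hb]
        · simp [he, hb]
      · have hne : pv.2 ≠ pvRunMax b P := by
          have := (le_pvRunMax b P).1; omega
        have hstep : pvStep (some b, locs) pv = (some b, locs) := by
          simp [pvStep, pvStepB, if_neg hv, he]
        rw [List.foldl_cons, hstep, ih, hM, hcons]
        simp [hne]

lemma pvRange3 : PySem.List.pyRange 0 3 1 = [0, 1, 2] := by decide

lemma pvColl_fold (M : Int) (P : List ((Int × Int) × Int)) (acc : List (Int × Int)) :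
    P.foldl (fun l pv => if pv.2 == M then l ++ [pv.1] else l) acc = acc ++ pvCollect M P :=
  PySem.List.foldl_append_if (fun pv => pv.2 == M) Prod.fst P acc

lemma pvCollect_cons (M : Int) (pv : (Int × Int) × Int) (P : List ((Int × Int) × Int)) :
    pvCollect M (pv :: P) = (if pv.2 == M then [pv.1] else []) ++ pvCollect M P := by
  by_cases h : pv.2 = M <;> simp [pvCollect, h]

lemma pvB_eq (g : List (List Int)) :
    get_max_locs_alt g = pvCollect (pvRunMax (pvCell g 0 0) (pvP g).tail) (pvP g) := by
  have h1 : get_max_locs_alt g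
      = ((pvP g).foldl pvStep ((none : Option Int), ([] : List (Int × Int)))).2 := by
    simp only [get_max_locs_alt, pvRange3]; rfl
  have h2 : (pvP g).foldl pvStep ((none : Option Int), ([] : List (Int × Int)))
      = List.foldl pvStep (some (pvCell g 0 0), [((0 : Int), (0 : Int))]) (pvP g).tail := rfl
  rw [h1, h2, pvInv]
  conv_rhs => rw [show pvP g = ((0, 0), pvCell g 0 0) :: (pvP g).tail from rfl, pvCollect_cons]
  rfl

set_option maxHeartbeats 1600000 in
lemma pvA_eq (g : List (List Int)) :
    get_max_locs g = pvCollect (pvRunMax (pvCell g 1 1) (pvP g)) (pvP g) := by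
  have h1 : get_max_locs g
      = (pvP g).foldl
          (fun l pv => if pv.2 == pvRunMax (pvCell g 1 1) (pvP g) then l ++ [pv.1] else l)
          [] := by
    simp only [get_max_locs, pvRange3]; rfl
  rw [h1, pvColl_fold]
  simp

lemma pvFoldlMax_le (P : List ((Int × Int) × Int)) (s c : Int) (hs : s ≤ c)
    (h : ∀ pv ∈ P, pv.2 ≤ c) : P.foldl (fun m pv => max m pv.2) s ≤ c := by
  induction P generalizing s with
  | nil => simpa
  | cons pv P ih =>
    simp only [List.foldl_cons]
    exact ih _ (by simp [hs, h pv (by simp)]) (fun q hq => h q (by simp [hq]))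

lemma pvMax_eq (g : List (List Int)) :
    pvRunMax (pvCell g 1 1) (pvP g) = pvRunMax (pvCell g 0 0) (pvP g).tail := by
  rw [pvRunMax_eq_foldl_max, pvRunMax_eq_foldl_max]
  have hA := PySem.List.le_foldl_max_int (pvP g) Prod.snd (pvCell g 1 1)
  have hB := PySem.List.le_foldl_max_int (pvP g).tail Prod.snd (pvCell g 0 0)
  apply le_antisymm
  · apply pvFoldlMax_le
    · exact hB.2 ((1, 1), pvCell g 1 1) (by simp [pvP])
    · intro pv hpv
      rcases List.mem_cons.mp
          (show pv ∈ ((0, 0), pvCell g 0 0) :: (pvP g).tail from hpv) with h | h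
      · subst h; exact hB.1
      · exact hB.2 pv h
  · apply pvFoldlMax_le
    · exact hA.2 ((0, 0), pvCell g 0 0) (by simp [pvP])
    · intro pv hpv; exact hA.2 pv (List.mem_of_mem_tail hpv)

-- ===== VERDICT (by name: the statement is the Claim_ definition above) =====
theorem get_max_locs_spec : Claim_equal_get_max_locs := by
  intro g _ _
  show get_max_locs g = get_max_locs_alt g
  rw [pvA_eq, pvB_eq, pvMax_eq]
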